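-- pv_equiv track=rewrite | github.com/meliao/ISP_baseline | helpers/compile_widebnet.py | find_nfreqs_per_partition
-- ===== SOURCE A (Python) =====
-- def find_nfreqs_per_partition(nu_vals, nu_partitions):
--     """Finds the number of frequencies per partition"""
--     # helper fn 1
--     def is_val_in_range(val, range_min, range_max):
--         """Indicate if val in (range_min, range_max].
--         Uses an exclusive lower bound and inclusive upper bound (to match the behavior in frequency bands)
--         """
--         return (val > range_min) and (val <= range_max)
--     # helper fn 2
--     def num_vals_in_range(vals, range_min, range_max):
--         """Finds how many values in a list are contained within a given range"""
--         return sum(is_val_in_range(val, range_min, range_max) for val in vals)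
--     # main portion
--     return [
--         num_vals_in_range(nu_vals, nu_ptn[0], nu_ptn[1])
--         for nu_ptn in nu_partitions
--     ]
-- ===== SOURCE B (Python) =====
-- def find_nfreqs_per_partition(nu_vals, nu_partitions):
--     """Finds the number of frequencies per partition.
--
--     Sorts nu_vals once, then answers each partition (min, max] with two
--     binary searches: count = #(vals <= max) - #(vals <= min), clamped at 0.
--     """
--     s = sorted(nu_vals)
--     n = len(s)
--
--     def bisect_right(x):
--         """Index of the first element strictly greater than x in s."""
--         lo, hi = 0, n
--         while lo < hi:
--             mid = (lo + hi) // 2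
--             if x < s[mid]:
--                 hi = mid
--             else:
--                 lo = mid + 1
--         return lo
--
--     return [max(0, bisect_right(mx) - bisect_right(mn)) for mn, mx in nu_partitions]
-- ===== Notes on version B (the rewrite author's own statement) =====
-- stated objective: faster
-- what changed: Instead of scanning all nu_vals for every partition, B sorts nu_vals once and answers each (min,max] partition with two binary searches, taking max(0, count_le(max) - count_le(min)).
import Mathlib
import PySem

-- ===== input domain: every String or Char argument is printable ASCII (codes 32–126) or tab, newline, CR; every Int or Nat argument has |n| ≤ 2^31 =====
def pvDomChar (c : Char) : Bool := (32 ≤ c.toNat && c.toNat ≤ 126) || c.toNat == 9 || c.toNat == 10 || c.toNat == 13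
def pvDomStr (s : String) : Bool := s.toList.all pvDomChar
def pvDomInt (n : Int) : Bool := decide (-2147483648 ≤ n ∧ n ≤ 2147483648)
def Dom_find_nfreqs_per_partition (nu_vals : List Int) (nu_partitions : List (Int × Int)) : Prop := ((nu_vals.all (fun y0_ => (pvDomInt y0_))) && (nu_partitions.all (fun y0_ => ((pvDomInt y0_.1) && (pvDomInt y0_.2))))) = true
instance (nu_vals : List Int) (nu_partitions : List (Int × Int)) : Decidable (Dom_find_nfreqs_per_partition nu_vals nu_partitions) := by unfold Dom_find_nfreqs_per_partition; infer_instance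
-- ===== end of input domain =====

-- B replaces A's per-partition scan of nu_vals by one sort plus two binary searches
-- per partition (objective: faster, asymptotic change measured).

-- ===== PORT A =====
-- helper fn 1: (val > range_min) and (val <= range_max)
def pvIsValInRange (val range_min range_max : Int) : Bool :=
  decide (val > range_min) && decide (val ≤ range_max)

-- helper fn 2: sum(bool for val in vals); Python sums booleans as ints
def pvNumValsInRange (vals : List Int) (range_min range_max : Int) : Int :=
  (vals.map (fun val => if pvIsValInRange val range_min range_max then (1 : Int) else 0)).sum

def find_nfreqs_per_partition (nu_vals : List Int) (nu_partitions : List (Int × Int)) : List Int :=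
  nu_partitions.map (fun nu_ptn => pvNumValsInRange nu_vals nu_ptn.1 nu_ptn.2)

-- ===== PORT B =====
-- Source B's hand-written bisect_right loop (while lo < hi …), transcribed as recursion on hi - lo;
-- s[mid] is in range whenever read (0 ≤ lo ≤ mid < hi ≤ len), so getD is exact here.
def pvBisectRight (s : List Int) (x : Int) (lo hi : Nat) : Nat :=
  if h : lo < hi then
    let mid := (lo + hi) / 2
    if x < s.getD mid 0 then pvBisectRight s x lo mid
    else pvBisectRight s x (mid + 1) hi
  else lo
termination_by hi - lo
decreasing_by all_goals omega

def find_nfreqs_per_partition_alt (nu_vals : List Int) (nu_partitions : List (Int × Int)) : List Int :=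
  let s := PySem.List.sorted nu_vals (fun v => v) false
  let n := s.length
  nu_partitions.map (fun p =>
    max 0 ((pvBisectRight s p.2 0 n : Int) - (pvBisectRight s p.1 0 n : Int)))

-- ===== PRECONDITION & SPEC =====
def Spec_find_nfreqs_per_partition (nu_vals : List Int) (nu_partitions : List (Int × Int)) (out : List Int) : Prop := out = find_nfreqs_per_partition_alt nu_vals nu_partitions
instance (nu_vals : List Int) (nu_partitions : List (Int × Int)) (out : List Int) : Decidable (Spec_find_nfreqs_per_partition nu_vals nu_partitions out) := by unfold Spec_find_nfreqs_per_partition; infer_instance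

-- ===== CLAIM (what is proved, stated in full; the proofs are below) =====
def Claim_equal_find_nfreqs_per_partition : Prop := ∀ (nu_vals : List Int) (nu_partitions : List (Int × Int)), Dom_find_nfreqs_per_partition nu_vals nu_partitions → Spec_find_nfreqs_per_partition nu_vals nu_partitions (find_nfreqs_per_partition nu_vals nu_partitions)

-- ===== LEMMAS AND PROOFS =====

-- the binary search returns the cut point: everything before it is ≤ x, everything from it on is > x
lemma pvBisectRight_spec (s : List Int) (x : Int) (hs : s.Pairwise (· ≤ ·)) :
    ∀ (n lo hi : Nat), hi - lo ≤ n → lo ≤ hi → hi ≤ s.length →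
    (∀ j (hj : j < s.length), j < lo → s[j] ≤ x) →
    (∀ j (hj : j < s.length), hi ≤ j → x < s[j]) →
    pvBisectRight s x lo hi ≤ s.length ∧
    (∀ j (hj : j < s.length), j < pvBisectRight s x lo hi → s[j] ≤ x) ∧
    (∀ j (hj : j < s.length), pvBisectRight s x lo hi ≤ j → x < s[j]) := by
  have hmono : ∀ i j (hi' : i < s.length) (hj : j < s.length), i ≤ j → s[i] ≤ s[j] := by
    intro i j hi' hj hij
    rcases Nat.lt_or_ge i j with h | h
    · exact (List.pairwise_iff_getElem.mp hs) i j hi' hj h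
    · have : i = j := by omega
      subst this; exact le_refl _
  intro n
  induction n with
  | zero =>
    intro lo hi hn hlh hhl hlow hhigh
    have : lo = hi := by omega
    subst this
    rw [pvBisectRight]
    simp only [lt_irrefl, dite_false]
    exact ⟨by omega, fun j hj hjk => hlow j hj hjk, fun j hj hk => hhigh j hj hk⟩
  | succ m ih =>
    intro lo hi hn hlh hhl hlow hhigh
    rw [pvBisectRight]
    by_cases h : lo < hi
    · simp only [h, dite_true]
      have hmid1 : lo ≤ (lo + hi) / 2 := by omega
      have hmid2 : (lo + hi) / 2 < hi := by omega
      have hmidlen : (lo + hi) / 2 < s.length := by omega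
      have hget : s.getD ((lo + hi) / 2) 0 = s[(lo + hi) / 2] := by
        exact List.getD_eq_getElem s 0 hmidlen
      rw [hget]
      by_cases hc : x < s[(lo + hi) / 2]
      · simp only [hc, if_true]
        exact ih lo ((lo + hi) / 2) (by omega) (by omega) (by omega) hlow
          (fun j hj hij => lt_of_lt_of_le hc (hmono _ _ hmidlen hj hij))
      · simp only [hc, if_false]
        exact ih ((lo + hi) / 2 + 1) hi (by omega) (by omega) hhl
          (fun j hj hij => le_trans (hmono _ _ hj hmidlen (by omega)) (by omega))
          hhigh
    · simp only [h, dite_false]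
      exact ⟨by omega, fun j hj hjk => hlow j hj hjk, fun j hj hk => hhigh j hj (by omega)⟩

-- a cut point of a list determines countP
lemma countP_eq_of_cut (p : Int → Bool) :
    ∀ (s : List Int) (k : Nat), k ≤ s.length →
    (∀ j (hj : j < s.length), p s[j] = true ↔ j < k) → s.countP p = k := by
  intro s
  induction s with
  | nil =>
    intro k hk _
    simp only [List.countP_nil]
    simp at hk
    omega
  | cons a t ih =>
    intro k hk h
    cases k with
    | zero =>
      have ha : p a = false := by
        cases hpa : p a
        · rfl
        · exact absurd ((h 0 (by simp)).mp hpa) (by omega)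
      have ht : t.countP p = 0 := by
        apply ih 0 (by omega)
        intro j hj
        have := h (j + 1) (by simpa using Nat.succ_lt_succ hj)
        simpa using this
      simp [ha, ht]
    | succ k' =>
      have ha : p a = true := (h 0 (by simp)).mpr (by omega)
      have ht : t.countP p = k' := by
        apply ih k' (by simpa using hk)
        intro j hj
        have := h (j + 1) (by simpa using Nat.succ_lt_succ hj)
        simpa [Nat.succ_lt_succ_iff] using this
      simp [ha, ht]

-- on the sorted copy, bisect_right computes the count of elements ≤ x
lemma pvBisectRight_countP (s : List Int) (x : Int) (hs : s.Pairwise (· ≤ ·)) :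
    s.countP (fun v => decide (v ≤ x)) = pvBisectRight s x 0 s.length := by
  obtain ⟨hle, hlow, hhigh⟩ := pvBisectRight_spec s x hs s.length 0 s.length
    (by omega) (by omega) (le_refl _) (by omega) (by omega)
  apply countP_eq_of_cut
  · exact hle
  · intro j hj
    constructor
    · intro hp
      by_contra hjk
      exact absurd (of_decide_eq_true hp) (not_le.mpr (hhigh j hj (by omega)))
    · intro hjk
      exact decide_eq_true (hlow j hj hjk)

-- pure counting arithmetic, any list: #(a < v ≤ b) = max 0 (#(v ≤ b) - #(v ≤ a))
lemma countP_range_eq (l : List Int) (a b : Int) :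
    (l.countP (fun v => decide (a < v) && decide (v ≤ b)) : Int) =
    max 0 ((l.countP (fun v => decide (v ≤ b)) : Int) - (l.countP (fun v => decide (v ≤ a)) : Int)) := by
  induction l with
  | nil => simp
  | cons v t ih =>
    have hm1 : ∀ (c d : Int), c ≤ d →
        t.countP (fun v => decide (v ≤ c)) ≤ t.countP (fun v => decide (v ≤ d)) := by
      intro c d hcd
      apply List.countP_mono_left
      intro x _ hx
      simp at hx ⊢
      omega
    simp only [List.countP_cons]
    by_cases h1 : a < v
    · by_cases h2 : v ≤ b
      · have hm := hm1 a b (by omega)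
        simp [h1, h2, show ¬ v ≤ a by omega]
        omega
      · simp [h1, h2, show ¬ v ≤ a by omega]
        omega
    · by_cases h2 : v ≤ b
      · simp [h1, h2, show v ≤ a by omega]
        omega
      · have hm := hm1 b a (by omega)
        simp [h1, h2, show v ≤ a by omega]
        omega

-- ===== VERDICT (by name: the statement is the Claim_ definition above) =====
theorem find_nfreqs_per_partition_spec : Claim_equal_find_nfreqs_per_partition := by
  intro nu_vals nu_partitions _
  unfold Spec_find_nfreqs_per_partition find_nfreqs_per_partition find_nfreqs_per_partition_alt
  simp only []
  apply List.map_congr_left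
  intro p _
  set s := PySem.List.sorted nu_vals (fun v => v) false with hsdef
  have hperm : s.Perm nu_vals := PySem.List.sorted_perm nu_vals (fun v => v) false
  have hsorted : s.Pairwise (· ≤ ·) := by
    simpa using PySem.List.sorted_pairwise nu_vals (fun v => v)
  have hb2 : s.countP (fun v => decide (v ≤ p.2)) = pvBisectRight s p.2 0 s.length :=
    pvBisectRight_countP s p.2 hsorted
  have hb1 : s.countP (fun v => decide (v ≤ p.1)) = pvBisectRight s p.1 0 s.length :=
    pvBisectRight_countP s p.1 hsorted
  have hA : pvNumValsInRange nu_vals p.1 p.2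
      = (nu_vals.countP (fun v => decide (p.1 < v) && decide (v ≤ p.2)) : Int) := by
    unfold pvNumValsInRange pvIsValInRange
    simp only [gt_iff_lt]
    exact PySem.List.sum_map_ite_one_zero _ _
  rw [hA, countP_range_eq nu_vals p.1 p.2,
      ← hperm.countP_eq (fun v => decide (v ≤ p.2)), ← hperm.countP_eq (fun v => decide (v ≤ p.1)),
      hb2, hb1]
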